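-- pv_equiv track=rewrite | github.com/yzkee/phidata | libs/agno/agno/db/migrations/v1_to_v2.py | _is_metrics_dict
-- ===== SOURCE A (Python) =====
-- from typing import Any, Dict, List, Optional, Union
--
-- def _is_metrics_dict(data: Dict[str, Any]) -> bool:
--     """Check if a dictionary looks like a metrics dictionary based on common field names."""
--     if not isinstance(data, dict):
--         return False
--
--     # Common metrics field names (both v1 and v2)
--     metrics_indicators = {
--         "input_tokens",
--         "output_tokens",
--         "total_tokens",
--         "time",
--         "duration",
--         "audio_tokens",
--         "audio_total_tokens",
--         "audio_input_tokens",
--         "audio_output_tokens",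
--         "cached_tokens",
--         "cache_read_tokens",
--         "cache_write_tokens",
--         "reasoning_tokens",
--         "prompt_tokens",
--         "completion_tokens",
--         "time_to_first_token",
--         "provider_metrics",
--         "additional_metrics",
--     }
--
--     # Deprecated v1 fields that are strong indicators this is a metrics dict
--     deprecated_v1_indicators = {"time", "audio_tokens", "cached_tokens", "prompt_tokens", "completion_tokens"}
--
--     # If we find any deprecated v1 field, it's definitely a metrics dict that needs conversion
--     if any(field in data for field in deprecated_v1_indicators):
--         return True
--
--     # Otherwise, if the dict has at least 2 metrics-related fields, consider it a metrics dict
--     matching_fields = sum(1 for field in data.keys() if field in metrics_indicators)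
--     return matching_fields >= 2
-- ===== SOURCE B (Python) =====
-- # Weighted-score formulation: one precomputed key->weight table (deprecated v1
-- # fields weigh 2, other metrics indicators weigh 1) and a single arithmetic sum;
-- # the dict is a metrics dict iff the total score reaches 2.
-- _WEIGHT = {
--     "input_tokens": 1,
--     "output_tokens": 1,
--     "total_tokens": 1,
--     "time": 2,
--     "duration": 1,
--     "audio_tokens": 2,
--     "audio_total_tokens": 1,
--     "audio_input_tokens": 1,
--     "audio_output_tokens": 1,
--     "cached_tokens": 2,
--     "cache_read_tokens": 1,
--     "cache_write_tokens": 1,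
--     "reasoning_tokens": 1,
--     "prompt_tokens": 2,
--     "completion_tokens": 2,
--     "time_to_first_token": 1,
--     "provider_metrics": 1,
--     "additional_metrics": 1,
-- }
--
--
-- def _is_metrics_dict(data) -> bool:
--     """Score every key with the weight table and compare the total against 2."""
--     if not isinstance(data, dict):
--         return False
--     return sum(_WEIGHT.get(key, 0) for key in data) >= 2
-- ===== Notes on version B (the rewrite author's own statement) =====
-- stated objective: alternative
-- what changed: Replaces A's two-stage boolean test (any() over the deprecated set, then a counting comprehension with a threshold) by a single weighted sum over the keys against one precomputed weight table (deprecated fields weigh 2, other indicators 1), returning score >= 2.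
import Mathlib
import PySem

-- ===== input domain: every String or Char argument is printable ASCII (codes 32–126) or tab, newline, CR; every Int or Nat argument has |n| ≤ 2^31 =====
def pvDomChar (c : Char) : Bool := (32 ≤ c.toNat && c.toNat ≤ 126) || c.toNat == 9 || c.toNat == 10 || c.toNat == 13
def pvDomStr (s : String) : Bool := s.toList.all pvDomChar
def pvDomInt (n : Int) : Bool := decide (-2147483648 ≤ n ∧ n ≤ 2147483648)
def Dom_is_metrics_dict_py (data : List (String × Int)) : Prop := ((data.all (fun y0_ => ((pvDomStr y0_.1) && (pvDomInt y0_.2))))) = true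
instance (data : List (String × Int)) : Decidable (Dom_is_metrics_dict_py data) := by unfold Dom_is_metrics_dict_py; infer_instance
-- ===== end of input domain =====

-- B replaces A's two-stage boolean test with a single weighted sum of the keys
-- against one precomputed weight table (deprecated fields weigh 2, indicators 1),
-- returning score >= 2; an alternative formulation of the same cost.

-- ===== PORT A =====
def metricsIndicators : List String :=
  ["input_tokens", "output_tokens", "total_tokens", "time", "duration",
   "audio_tokens", "audio_total_tokens", "audio_input_tokens", "audio_output_tokens",
   "cached_tokens", "cache_read_tokens", "cache_write_tokens", "reasoning_tokens",
   "prompt_tokens", "completion_tokens", "time_to_first_token",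
   "provider_metrics", "additional_metrics"]

def deprecatedV1Indicators : List String :=
  ["time", "audio_tokens", "cached_tokens", "prompt_tokens", "completion_tokens"]

-- 'any(field in data for field in deprecated_v1_indicators)' then
-- 'sum(1 for field in data.keys() if field in metrics_indicators) >= 2'
def is_metrics_dict_py (data : List (String × Int)) : Bool :=
  if deprecatedV1Indicators.any (fun field => data.any (fun kv => kv.1 == field)) then
    true
  else
    let matching_fields : Nat :=
      data.foldl (fun acc kv => if metricsIndicators.contains kv.1 then acc + 1 else acc) 0
    decide (2 ≤ matching_fields)

-- ===== PORT B =====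
-- the _WEIGHT dict literal (unique keys; first-match lookup = Python dict lookup)
def weightTable : List (String × Int) :=
  [("input_tokens", 1), ("output_tokens", 1), ("total_tokens", 1), ("time", 2),
   ("duration", 1), ("audio_tokens", 2), ("audio_total_tokens", 1),
   ("audio_input_tokens", 1), ("audio_output_tokens", 1), ("cached_tokens", 2),
   ("cache_read_tokens", 1), ("cache_write_tokens", 1), ("reasoning_tokens", 1),
   ("prompt_tokens", 2), ("completion_tokens", 2), ("time_to_first_token", 1),
   ("provider_metrics", 1), ("additional_metrics", 1)]

-- '_WEIGHT.get(key, 0)': first-match association-list lookup with a default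
def dictGetD : List (String × Int) → String → Int → Int
  | [], _, dflt => dflt
  | p :: rest, k, dflt => if k == p.1 then p.2 else dictGetD rest k dflt

-- 'sum(_WEIGHT.get(key, 0) for key in data) >= 2'
def is_metrics_dict_py_alt (data : List (String × Int)) : Bool :=
  decide (2 ≤ data.foldl (fun acc kv => acc + dictGetD weightTable kv.1 0) 0)

-- ===== PRECONDITION & SPEC =====
def Spec_is_metrics_dict_py (data : List (String × Int)) (out : Bool) : Prop := out = is_metrics_dict_py_alt data
instance (data : List (String × Int)) (out : Bool) : Decidable (Spec_is_metrics_dict_py data out) := by unfold Spec_is_metrics_dict_py; infer_instance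

-- ===== CLAIM (what is proved, stated in full; the proofs are below) =====
def Claim_equal_is_metrics_dict_py : Prop := ∀ (data : List (String × Int)), Dom_is_metrics_dict_py data → Spec_is_metrics_dict_py data (is_metrics_dict_py data)

-- ===== LEMMAS AND PROOFS =====

-- The weight of a key in closed form: 2 on deprecated fields, 1 on the other
-- indicators, 0 elsewhere.
theorem dictGetD_weight (s : String) :
    dictGetD weightTable s 0 =
      if deprecatedV1Indicators.contains s then 2
      else if metricsIndicators.contains s then 1 else 0 := by
  by_cases h1 : s = "input_tokens"
  · subst h1; decide
  by_cases h2 : s = "output_tokens"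
  · subst h2; decide
  by_cases h3 : s = "total_tokens"
  · subst h3; decide
  by_cases h4 : s = "time"
  · subst h4; decide
  by_cases h5 : s = "duration"
  · subst h5; decide
  by_cases h6 : s = "audio_tokens"
  · subst h6; decide
  by_cases h7 : s = "audio_total_tokens"
  · subst h7; decide
  by_cases h8 : s = "audio_input_tokens"
  · subst h8; decide
  by_cases h9 : s = "audio_output_tokens"
  · subst h9; decide
  by_cases h10 : s = "cached_tokens"
  · subst h10; decide
  by_cases h11 : s = "cache_read_tokens"
  · subst h11; decide
  by_cases h12 : s = "cache_write_tokens"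
  · subst h12; decide
  by_cases h13 : s = "reasoning_tokens"
  · subst h13; decide
  by_cases h14 : s = "prompt_tokens"
  · subst h14; decide
  by_cases h15 : s = "completion_tokens"
  · subst h15; decide
  by_cases h16 : s = "time_to_first_token"
  · subst h16; decide
  by_cases h17 : s = "provider_metrics"
  · subst h17; decide
  by_cases h18 : s = "additional_metrics"
  · subst h18; decide
  simp [dictGetD, weightTable, deprecatedV1Indicators, metricsIndicators, h1, h2, h3, h4, h5, h6, h7, h8, h9, h10, h11, h12, h13, h14, h15, h16, h17, h18]

-- B's sum fold in closed form: twice the number of deprecated keys plus the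
-- number of remaining indicator keys.
theorem foldl_weight (l : List (String × Int)) : ∀ (c : Int),
    l.foldl (fun acc kv => acc + dictGetD weightTable kv.1 0) c
      = c + 2 * ((l.filter (fun kv => deprecatedV1Indicators.contains kv.1)).length : Int)
          + ((l.filter (fun kv =>
                !deprecatedV1Indicators.contains kv.1 && metricsIndicators.contains kv.1)).length : Int) := by
  induction l with
  | nil => intro c; simp
  | cons kv rest ih =>
    intro c
    rw [List.foldl_cons, ih, dictGetD_weight, List.filter_cons, List.filter_cons]
    by_cases hd : deprecatedV1Indicators.contains kv.1 <;>
      by_cases hm : metricsIndicators.contains kv.1 <;>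
      simp only [hd, hm, Bool.not_true, Bool.not_false, Bool.false_and, Bool.true_and,
        if_true, if_false, List.length_cons] <;>
      push_cast <;> ring

-- A's counting fold in closed form.
theorem foldl_count (l : List (String × Int)) : ∀ (c : Nat),
    l.foldl (fun acc kv => if metricsIndicators.contains kv.1 then acc + 1 else acc) c
      = c + (l.filter (fun kv => metricsIndicators.contains kv.1)).length := by
  induction l with
  | nil => intro c; simp
  | cons kv rest ih =>
    intro c
    rw [List.foldl_cons, List.filter_cons]
    by_cases hm : metricsIndicators.contains kv.1
    · rw [if_pos hm, ih, if_pos hm]; simp only [List.length_cons]; omega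
    · rw [if_neg hm, ih, if_neg hm]

-- every deprecated field is a metrics indicator
theorem dep_sub_ind (s : String) (h : deprecatedV1Indicators.contains s = true) :
    metricsIndicators.contains s = true := by
  simp only [deprecatedV1Indicators, List.contains_cons, List.contains_nil,
    Bool.or_eq_true, beq_iff_eq] at h
  rcases h with rfl | rfl | rfl | rfl | rfl | h
  · decide
  · decide
  · decide
  · decide
  · decide
  · exact absurd h (by decide)

-- hence A's indicator count splits into deprecated + non-deprecated indicators
theorem count_split (l : List (String × Int)) :
    (l.filter (fun kv => metricsIndicators.contains kv.1)).length
      = (l.filter (fun kv => deprecatedV1Indicators.contains kv.1)).length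
        + (l.filter (fun kv =>
            !deprecatedV1Indicators.contains kv.1 && metricsIndicators.contains kv.1)).length := by
  induction l with
  | nil => rfl
  | cons kv rest ih =>
    simp only [List.filter_cons]
    by_cases hd : deprecatedV1Indicators.contains kv.1
    · have hm := dep_sub_ind kv.1 hd
      simp only [hd, hm, Bool.not_true, Bool.false_and, Bool.false_eq_true, if_true, if_false,
        List.length_cons]
      omega
    · by_cases hm : metricsIndicators.contains kv.1 <;>
        simp only [hd, hm, Bool.not_false, Bool.true_and, if_true, if_false,
          Bool.false_eq_true, List.length_cons] <;> omega

-- the deprecated-field test, restated over the keys: 'deprecated count > 0'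
theorem any_dep_iff (l : List (String × Int)) :
    deprecatedV1Indicators.any (fun field => l.any (fun kv => kv.1 == field)) = true
      ↔ 0 < (l.filter (fun kv => deprecatedV1Indicators.contains kv.1)).length := by
  constructor
  · intro h
    simp only [List.any_eq_true] at h
    obtain ⟨f, hf, kv, hkv, hb⟩ := h
    have hmem : kv.1 ∈ deprecatedV1Indicators := by rw [eq_of_beq hb]; exact hf
    exact List.length_pos_of_mem (List.mem_filter.mpr ⟨hkv, by simpa using hmem⟩)
  · intro h
    obtain ⟨kv, hkv⟩ := List.exists_mem_of_length_pos h
    obtain ⟨hmem, hc⟩ := List.mem_filter.mp hkv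
    simp only [List.any_eq_true]
    exact ⟨kv.1, by simpa using hc, kv, hmem, by simp⟩

-- ===== VERDICT (by name: the statement is the Claim_ definition above) =====
theorem is_metrics_dict_py_spec : Claim_equal_is_metrics_dict_py := by
  intro data _
  unfold Spec_is_metrics_dict_py is_metrics_dict_py is_metrics_dict_py_alt
  rw [foldl_weight, foldl_count, count_split]
  by_cases hd : deprecatedV1Indicators.any (fun field => data.any (fun kv => kv.1 == field)) = true
  · rw [if_pos hd]
    have := (any_dep_iff data).mp hd
    symm; rw [decide_eq_true_iff]; omega
  · rw [if_neg hd]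
    have h0 : ¬ 0 < (data.filter (fun kv => deprecatedV1Indicators.contains kv.1)).length := by
      intro h; exact hd ((any_dep_iff data).mpr h)
    simp only [decide_eq_decide]
    omega
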